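-- pv_equiv track=rewrite | github.com/juliawiktoria/ros_project | scripts/pathplanning.py | create_tours
-- ===== SOURCE A (Python) =====
-- import itertools
--
-- def create_tours(arr):
--     # detach the robot because it is always the starting point
--     robot = arr.pop(0)
--     all_permutations = list(itertools.permutations(arr))
--     robot_permutations = []
--     # make sure all tours start with robot's origin
--     for elem in all_permutations:
--         new_list = [robot]
--         new_list.extend(elem)
--         robot_permutations.append(tuple(new_list))
--     return robot_permutations
-- ===== SOURCE B (Python) =====
-- def create_tours(arr):
--     # Same observable mutation as the original: remove the robot from arr.
--     robot = arr.pop(0)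
--     out = []
--
--     def go(prefix, remaining):
--         if not remaining:
--             out.append(tuple([robot] + prefix))
--         else:
--             for i in range(len(remaining)):
--                 go(prefix + [remaining[i]], remaining[:i] + remaining[i + 1:])
--
--     go([], arr)
--     return out
-- ===== Notes on version B (the rewrite author's own statement) =====
-- stated objective: alternative
-- what changed: Replaces itertools.permutations plus a separate prepend-loop with a single recursive backtracking generator that carries the robot-prefixed partial tour and appends each completed tour directly to the output.
import Mathlib
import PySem

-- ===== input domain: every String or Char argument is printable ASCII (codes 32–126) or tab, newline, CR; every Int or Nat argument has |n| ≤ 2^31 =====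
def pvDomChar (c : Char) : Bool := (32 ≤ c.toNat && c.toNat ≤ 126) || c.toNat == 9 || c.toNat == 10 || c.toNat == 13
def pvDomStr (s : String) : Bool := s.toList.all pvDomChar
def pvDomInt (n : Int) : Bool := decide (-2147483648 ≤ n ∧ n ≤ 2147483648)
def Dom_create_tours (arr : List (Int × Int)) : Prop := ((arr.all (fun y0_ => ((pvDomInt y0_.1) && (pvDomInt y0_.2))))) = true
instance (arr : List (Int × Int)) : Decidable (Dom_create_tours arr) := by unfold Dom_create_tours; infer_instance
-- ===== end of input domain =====

-- B replaces itertools.permutations + a prepend loop by one recursive backtracking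
-- generator; equivalence is about the RETURN value (both versions pop arr[0] in Python).

-- ===== PORT A =====
-- itertools.permutations(xs): library call, ported as its documented recursive
-- equivalent (pick each element in current order, recurse on the rest).
def pyPermutations : List (Int × Int) → List (List (Int × Int))
  | [] => [[]]
  | x :: xs =>
    (List.range (x :: xs).length).attach.flatMap
      (fun i =>
        (pyPermutations ((x :: xs).eraseIdx i.1)).map
          (fun e => (x :: xs)[i.1]! :: e))
termination_by l => l.length
decreasing_by
  have hi : i.1 < xs.length + 1 := by simpa using List.mem_range.mp i.2
  simp [List.length_eraseIdx, Nat.lt_succ_iff.mp hi]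

-- robot = arr.pop(0); loop appending [robot] ++ elem (empty arr raises: Pre_).
def create_tours (arr : List (Int × Int)) : List (List (Int × Int)) :=
  match arr with
  | [] => []
  | robot :: rest =>
    (pyPermutations rest).foldl (fun acc elem => acc ++ [robot :: elem]) []

-- ===== PORT B =====
def goTours (robot : Int × Int) :
    List (Int × Int) → List (Int × Int) → List (List (Int × Int)) → List (List (Int × Int))
  | prefix_, [], out => out ++ [robot :: prefix_]
  | prefix_, y :: ys, out =>
    (List.range (y :: ys).length).attach.foldl
      (fun acc i =>
        goTours robot (prefix_ ++ [(y :: ys)[i.1]!]) ((y :: ys).eraseIdx i.1) acc)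
      out
termination_by _ rem _ => rem.length
decreasing_by
  have hi : i.1 < ys.length + 1 := by simpa using List.mem_range.mp i.2
  simp [List.length_eraseIdx, Nat.lt_succ_iff.mp hi]

def create_tours_alt (arr : List (Int × Int)) : List (List (Int × Int)) :=
  match arr with
  | [] => []
  | robot :: rest => goTours robot [] rest []

-- ===== PRECONDITION & SPEC =====
-- A raises IndexError on arr.pop(0) for the empty list; B raises there too.
def Pre_create_tours (arr : List (Int × Int)) : Prop := arr ≠ []
instance (arr : List (Int × Int)) : Decidable (Pre_create_tours arr) := by
  unfold Pre_create_tours; infer_instance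

def pvWitness_create_tours : (List (Int × Int)) := [(0, 0), (1, 2), (3, 4)]

def Spec_create_tours (arr : List (Int × Int)) (out : List (List (Int × Int))) : Prop := out = create_tours_alt arr
instance (arr : List (Int × Int)) (out : List (List (Int × Int))) : Decidable (Spec_create_tours arr out) := by unfold Spec_create_tours; infer_instance

-- ===== CLAIM (what is proved, stated in full; the proofs are below) =====
def Claim_equal_create_tours : Prop := ∀ (arr : List (Int × Int)), Dom_create_tours arr → Pre_create_tours arr → Spec_create_tours arr (create_tours arr)

-- ===== LEMMAS AND PROOFS =====

-- The backtracking accumulator equals the permutations of the remainder,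
-- each prefixed by the partial tour.
theorem goTours_eq (robot : Int × Int) (rem prefix_ : List (Int × Int))
    (out : List (List (Int × Int))) :
    goTours robot prefix_ rem out
      = out ++ (pyPermutations rem).map (fun e => robot :: (prefix_ ++ e)) := by
  match rem with
  | [] => simp [goTours, pyPermutations]
  | y :: ys =>
    rw [goTours, pyPermutations]
    rw [PySem.List.foldl_congr_mem (g := fun acc i =>
        acc ++ (pyPermutations ((y :: ys).eraseIdx i.1)).map
          (fun e => robot :: ((prefix_ ++ [(y :: ys)[i.1]!]) ++ e)))]
    · rw [PySem.List.foldl_append_eq_flatMap, List.map_flatMap]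
      congr 1
      apply List.flatMap_congr
      intro i _
      simp [List.map_map, Function.comp]
    · intro acc i hi
      exact goTours_eq robot ((y :: ys).eraseIdx i.1) (prefix_ ++ [(y :: ys)[i.1]!]) acc
termination_by rem.length
decreasing_by
  have hi2 : i.1 < ys.length + 1 := by simpa using List.mem_range.mp i.2
  simp [List.length_eraseIdx, Nat.lt_succ_iff.mp hi2]

-- ===== VERDICT (by name: the statement is the Claim_ definition above) =====
theorem create_tours_spec : Claim_equal_create_tours := by
  intro arr _ hpre
  unfold Spec_create_tours
  match arr with
  | [] => exact absurd rfl hpre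
  | robot :: rest =>
    simp only [create_tours, create_tours_alt]
    rw [PySem.List.foldl_append_singleton_eq_map, goTours_eq]
    simp
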